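-- pv_equiv track=rewrite | github.com/daalgi/algorithms | graphs/find_all_possible_recipes_from_given_supplies.py | dfs_recursion
-- ===== SOURCE A (Python) =====
-- from typing import List
--
-- def dfs_recursion(
--     recipes: List[str], ingredients: List[List[str]], supplies: List[str]
-- ) -> List[str]:
--     # Time complexity: O(n)
--     # Space complexity: O(n)
--
--     def dfs(recipe: str) -> bool:
--         # Depth First Search recursive function
--
--         if recipe not in can_make:
--             # If the current `recipe` is not yet in the hashmap
--             # `can_make`, find out if all its ingredients can
--             # be found.
--             # First, initialize the current `recipe` in the
--             # hashmap as can't make it (False) to avoid an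
--             # infinite loop due to a cycle
--             can_make[recipe] = False
--             # Loop over all the ingredients
--             can_make[recipe] = all([dfs(ingr) for ingr in graph[recipe]])
--
--         # The current `recipe` has already been stored in the hashmap,
--         # so return it
--         return can_make[recipe]
--
--     # Convert `supplies` into a hashset for O(1) lookups
--     supplies = set(supplies)
--
--     # Hashmap to track whether a recipe or ingredient can be made
--     # or found in the `supplies`, i.e.
--     # { "bread": True, "meat": False }
--     can_make = {}
--
--     # Build a adjacency list `graph`
--     # {"ingredient1": ["subingredient1", "subingredient1", ...], ...}
--     graph = {r: [] for r in recipes}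
--     n = len(recipes)
--     # Loop over the `recipes`
--     for i in range(n):
--         # Loop over the `ingredients` of the current recipe
--         for ingr in ingredients[i]:
--             if ingr not in supplies:
--                 # If the current ingredient `ingr` is not in `supplies`,
--                 # it may be a composed ingredient (that depends on other
--                 # basic ingredients), so add it to the graph
--                 # to check later on if it can be made
--                 graph[recipes[i]].append(ingr if ingr in graph else recipes[i])
--
--     # Return a list of the recipees that can be made
--     # using the recursive function `dfs`
--     return [recipe for recipe in recipes if dfs(recipe)]
-- ===== SOURCE B (Python) =====
-- def dfs_recursion(recipes, ingredients, supplies):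
--     # Bottom-up fixed-point iteration instead of memoized recursion:
--     # grow the set of makeable recipes until it stabilizes (bounded rounds).
--     sup = set(supplies)
--     need = {}
--     for r, ings in zip(recipes, ingredients):
--         need.setdefault(r, []).extend(ings)
--     made = set()
--     for _ in range(len(need)):
--         made = {r for r, ings in need.items()
--                 if all(i in sup or i in made for i in ings)}
--     return [r for r in recipes if r in made]
-- ===== Notes on version B (the rewrite author's own statement) =====
-- stated objective: alternative
-- what changed: Replaces A's top-down memoized recursive DFS (with a False-first cycle guard and a self-loop adjacency trick for unknown ingredients) by a bottom-up fixed-point iteration: concatenate each recipe's ingredient lists once, then repeatedly recompute the whole set of currently-makeable recipes for len(need) rounds, after which it has provably stabilized at the least fixed point.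
import Mathlib
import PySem

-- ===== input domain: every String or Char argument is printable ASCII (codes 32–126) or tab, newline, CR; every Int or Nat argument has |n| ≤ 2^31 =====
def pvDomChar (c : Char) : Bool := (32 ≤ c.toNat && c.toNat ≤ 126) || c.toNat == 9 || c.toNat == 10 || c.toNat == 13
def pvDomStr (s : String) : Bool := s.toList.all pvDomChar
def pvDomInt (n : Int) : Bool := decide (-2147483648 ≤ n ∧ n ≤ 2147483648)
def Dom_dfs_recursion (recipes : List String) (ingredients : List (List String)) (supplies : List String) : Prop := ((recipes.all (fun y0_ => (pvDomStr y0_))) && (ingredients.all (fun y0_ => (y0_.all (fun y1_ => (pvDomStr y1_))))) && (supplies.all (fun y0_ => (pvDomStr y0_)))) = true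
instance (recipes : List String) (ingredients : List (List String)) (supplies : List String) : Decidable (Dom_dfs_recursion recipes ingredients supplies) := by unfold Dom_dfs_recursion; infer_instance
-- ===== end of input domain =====

-- B replaces A's memoized recursive DFS (cycle guard + self-loop trick) by a bottom-up
-- fixed-point iteration over the set of makeable recipes; alternative algorithm, same results.


-- ===== PORT A =====
-- A's inner `dfs` (mutually with the list comprehension `[dfs(ingr) for ingr in graph[recipe]]`),
-- threading the `can_make` dict; the fuel argument only makes the recursion total (Python's
-- recursion terminates because a key is inserted before recursing; fuel = recipes.length + 1
-- is always sufficient, which the proofs below establish).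
mutual
def dfsA (graph : PySem.Dict String (List String)) (fuel : Nat)
    (cm : PySem.Dict String Bool) (r : String) : Bool × PySem.Dict String Bool :=
  match fuel with
  | 0 => (false, cm)
  | fuel + 1 =>
    if cm.contains r then (cm.getD r false, cm)
    else
      let cm1 := cm.insert r false
      let p := dfsAList graph fuel cm1 (graph.getD r [])
      let v := p.1.all id
      (v, p.2.insert r v)
  termination_by (fuel, 0)

def dfsAList (graph : PySem.Dict String (List String)) (fuel : Nat)
    (cm : PySem.Dict String Bool) (l : List String) : List Bool × PySem.Dict String Bool :=
  match l with
  | [] => ([], cm)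
  | i :: rest =>
    let q := dfsA graph fuel cm i
    let p := dfsAList graph fuel q.2 rest
    (q.1 :: p.1, p.2)
  termination_by (fuel, l.length + 1)
end

def dfs_recursion (recipes : List String) (ingredients : List (List String)) (supplies : List String) : List String :=
  -- supplies = set(supplies)
  let sup : PySem.Set String := PySem.Set.ofList supplies
  -- graph = {r: [] for r in recipes}
  let graph0 : PySem.Dict String (List String) :=
    recipes.foldl (fun d r => d.insert r []) PySem.Dict.empty
  -- for i in range(n): for ingr in ingredients[i]: ...
  -- (ingredients[i] raises IndexError when out of range: excluded by Pre_; .getD is never used inside Pre_)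
  let graph : PySem.Dict String (List String) :=
    (PySem.List.pyRange 0 (recipes.length : Int) 1).foldl (fun g i =>
      ((PySem.List.pyGet? ingredients i).getD []).foldl (fun g ingr =>
        if sup.contains ingr then g
        else g.modify ((PySem.List.pyGet? recipes i).getD "") []
          (fun l => l ++ [if g.contains ingr then ingr else (PySem.List.pyGet? recipes i).getD ""])) g)
      graph0
  -- return [recipe for recipe in recipes if dfs(recipe)]   (can_make = {} threads through)
  (recipes.foldl (fun acc r =>
      let q := dfsA graph (recipes.length + 1) acc.2 r
      (if q.1 then acc.1 ++ [r] else acc.1, q.2))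
    (([] : List String), (PySem.Dict.empty : PySem.Dict String Bool))).1

-- ===== PORT B =====
def dfs_recursion_alt (recipes : List String) (ingredients : List (List String)) (supplies : List String) : List String :=
  let sup : PySem.Set String := PySem.Set.ofList supplies
  -- need.setdefault(r, []).extend(ings)  over zip(recipes, ingredients)
  let need : PySem.Dict String (List String) :=
    (recipes.zip ingredients).foldl (fun d p => d.modify p.1 [] (fun l => l ++ p.2)) PySem.Dict.empty
  -- for _ in range(len(need)): made = {r for r, ings in need.items() if all(...)}
  let made : PySem.Set String :=
    (List.range need.size).foldl (fun (made : PySem.Set String) _ =>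
      PySem.Set.ofList ((need.items.filter
        (fun p => p.2.all (fun i => sup.contains i || made.contains i))).map (fun p => p.1)))
      PySem.Set.empty
  -- return [r for r in recipes if r in made]
  recipes.filter (fun r => made.contains r)

-- ===== PRECONDITION & SPEC =====
-- Pre_ excludes exactly the inputs where A raises IndexError (ingredients[i] for i < len(recipes)).
def Pre_dfs_recursion (recipes : List String) (ingredients : List (List String)) (supplies : List String) : Prop :=
  recipes.length ≤ ingredients.length
instance (recipes : List String) (ingredients : List (List String)) (supplies : List String) : Decidable (Pre_dfs_recursion recipes ingredients supplies) := by unfold Pre_dfs_recursion; infer_instance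

def pvWitness_dfs_recursion : List String × List (List String) × List String :=
  (["bread"], [["flour"]], ["flour"])

def Spec_dfs_recursion (recipes : List String) (ingredients : List (List String)) (supplies : List String) (out : List String) : Prop := out = dfs_recursion_alt recipes ingredients supplies
instance (recipes : List String) (ingredients : List (List String)) (supplies : List String) (out : List String) : Decidable (Spec_dfs_recursion recipes ingredients supplies out) := by unfold Spec_dfs_recursion; infer_instance

-- ===== CLAIM (what is proved, stated in full; the proofs are below) =====
def Claim_equal_dfs_recursion : Prop := ∀ (recipes : List String) (ingredients : List (List String)) (supplies : List String), Dom_dfs_recursion recipes ingredients supplies → Pre_dfs_recursion recipes ingredients supplies → Spec_dfs_recursion recipes ingredients supplies (dfs_recursion recipes ingredients supplies)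

-- ===== LEMMAS AND PROOFS =====

-- The common semantics: `MkP inK adj n r` = "r has a derivation of depth < n that it is
-- makeable", for node predicate `inK` and adjacency `adj`.  Its least fixed point `LfpP`
-- is what both programs compute per recipe.
def MkP (inK : String → Prop) (adj : String → List String) : Nat → String → Prop
  | 0, _ => False
  | n + 1, r => inK r ∧ ∀ i ∈ adj r, MkP inK adj n i

def LfpP (inK : String → Prop) (adj : String → List String) (r : String) : Prop :=
  ∃ n, MkP inK adj n r

def ReachP (adj : String → List String) : String → String → Prop :=
  Relation.ReflTransGen (fun a b => b ∈ adj a)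

theorem mkp_inK {inK : String → Prop} {adj : String → List String} {n : Nat} {r : String}
    (h : MkP inK adj n r) : inK r := by
  cases n with
  | zero => exact absurd h (by simp [MkP])
  | succ n => exact h.1

theorem mkp_mono {inK : String → Prop} {adj : String → List String} :
    ∀ {n : Nat} {r : String}, MkP inK adj n r → MkP inK adj (n + 1) r := by
  intro n
  induction n with
  | zero => intro r h; exact absurd h (by simp [MkP])
  | succ n ih => intro r h; exact ⟨h.1, fun i hi => ih (h.2 i hi)⟩

theorem mkp_le {inK : String → Prop} {adj : String → List String} {n m : Nat} {r : String}
    (hnm : n ≤ m) (h : MkP inK adj n r) : MkP inK adj m r := by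
  induction hnm with
  | refl => exact h
  | step _ ih => exact mkp_mono (by exact ih)

theorem mkp_reach {inK : String → Prop} {adj : String → List String} {a b : String}
    (hr : ReachP adj a b) {n : Nat} (h : MkP inK adj n a) : MkP inK adj n b := by
  induction hr with
  | refl => exact h
  | tail _ hbc ih =>
    cases n with
    | zero => exact absurd ih (by simp [MkP])
    | succ m => exact mkp_mono (ih.2 _ hbc)

theorem not_mkp_of_cycle {inK : String → Prop} {adj : String → List String} {a b : String}
    (hb : b ∈ adj a) (hr : ReachP adj b a) : ∀ n, ¬ MkP inK adj n a := by
  intro n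
  induction n using Nat.strong_induction_on with
  | _ n ih =>
    intro h
    cases n with
    | zero => exact absurd h (by simp [MkP])
    | succ m =>
      exact ih m (Nat.lt_succ_self m) (mkp_reach hr (h.2 b hb))

theorem mkp_uniform {inK : String → Prop} {adj : String → List String} :
    ∀ (l : List String), (∀ i ∈ l, LfpP inK adj i) → ∃ N, ∀ i ∈ l, MkP inK adj N i := by
  intro l
  induction l with
  | nil => exact fun _ => ⟨0, by simp⟩
  | cons x t ih =>
    intro h
    obtain ⟨N, hN⟩ := ih (fun i hi => h i (List.mem_cons_of_mem _ hi))
    obtain ⟨n, hn⟩ := h x (List.mem_cons_self ..)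
    refine ⟨max n N, fun i hi => ?_⟩
    rcases List.mem_cons.mp hi with rfl | hi
    · exact mkp_le (Nat.le_max_left _ _) hn
    · exact mkp_le (Nat.le_max_right _ _) (hN i hi)

theorem lfp_intro {inK : String → Prop} {adj : String → List String} {r : String}
    (hK : inK r) (h : ∀ i ∈ adj r, LfpP inK adj i) : LfpP inK adj r := by
  obtain ⟨N, hN⟩ := mkp_uniform (adj r) h
  exact ⟨N + 1, hK, hN⟩

theorem lfp_elim {inK : String → Prop} {adj : String → List String} {r : String}
    (h : LfpP inK adj r) : ∀ i ∈ adj r, LfpP inK adj i := by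
  obtain ⟨n, hn⟩ := h
  cases n with
  | zero => exact absurd hn (by simp [MkP])
  | succ n => exact fun i hi => ⟨n, hn.2 i hi⟩

theorem mkp_congr {inK inK' : String → Prop} {adj adj' : String → List String}
    (hK : ∀ x, inK x ↔ inK' x) (ha : ∀ x, adj x = adj' x) :
    ∀ {n : Nat} {r : String}, MkP inK adj n r ↔ MkP inK' adj' n r := by
  intro n
  induction n with
  | zero => intro r; simp [MkP]
  | succ n ih =>
    intro r
    simp only [MkP]
    rw [hK r, ha r]
    exact and_congr Iff.rfl ⟨fun h i hi => ih.mp (h i hi), fun h i hi => ih.mpr (h i hi)⟩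

theorem stab_of_eq {inK : String → Prop} {adj : String → List String} {k : Nat}
    (h : ∀ r, MkP inK adj (k + 1) r ↔ MkP inK adj k r) :
    ∀ m, k ≤ m → ∀ r, MkP inK adj m r ↔ MkP inK adj k r := by
  intro m hm
  induction hm with
  | refl => exact fun r => Iff.rfl
  | @step m _ ih =>
    intro r
    rw [← h r]
    simp only [MkP]
    exact and_congr Iff.rfl
      ⟨fun hh i hi => (ih i).mp (hh i hi), fun hh i hi => (ih i).mpr (hh i hi)⟩

-- ---- A side: the memoized DFS computes LfpP ----

def unvisited (K : List String) (cm : PySem.Dict String Bool) : Nat :=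
  (K.filter (fun k => !(cm.contains k))).length

def GoodP (inK : String → Prop) (adj : String → List String) (P : String → Prop)
    (cm : PySem.Dict String Bool) : Prop :=
  ∀ r b, cm.get? r = some b →
    (b = true → LfpP inK adj r) ∧ (b = false → P r ∨ ¬ LfpP inK adj r)

theorem unvisited_mono {K : List String} {cm cm' : PySem.Dict String Bool}
    (h : ∀ k, cm.contains k = true → cm'.contains k = true) :
    unvisited K cm' ≤ unvisited K cm := by
  simp only [unvisited, ← List.countP_eq_length_filter]
  refine List.countP_mono_left (fun k _ hk => ?_)
  simp only [Bool.not_eq_eq_eq_not, Bool.not_true] at hk ⊢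
  cases hcm : cm.contains k with
  | false => rfl
  | true => exact absurd (h k hcm) (by simp [hk])

theorem unvisited_insert {K : List String} {cm : PySem.Dict String Bool} {r : String} {v : Bool}
    (hnd : K.Nodup) (hr : r ∈ K) (hc : cm.contains r = false) :
    unvisited K (cm.insert r v) + 1 = unvisited K cm := by
  induction K with
  | nil => cases hr
  | cons a t ih =>
    simp only [List.nodup_cons] at hnd
    simp only [unvisited, List.filter_cons] at *
    rcases List.mem_cons.mp hr with rfl | hr'
    · have h1 : ((cm.insert r v).contains r) = true := by
        rw [PySem.Dict.contains_insert]; simp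
      have h2 : t.filter (fun k => !(cm.insert r v).contains k)
          = t.filter (fun k => !cm.contains k) := by
        refine List.filter_congr (fun k hk => ?_)
        rw [PySem.Dict.contains_insert]
        have : (k == r) = false := by
          simp only [beq_eq_false_iff_ne, ne_eq]
          rintro rfl; exact hnd.1 hk
        rw [this, Bool.false_or]
      rw [h1, hc, h2]
      simp
    · have har : a ≠ r := fun hh => hnd.1 (hh ▸ hr')
      have h1 : ((cm.insert r v).contains a) = cm.contains a := by
        rw [PySem.Dict.contains_insert]
        have : (a == r) = false := by simpa using har
        rw [this, Bool.false_or]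
      rw [h1]
      cases hca : cm.contains a with
      | true => simpa using ih hnd.2 hr'
      | false => simpa using ih hnd.2 hr'

def SpecOne (graph : PySem.Dict String (List String)) (fuel : Nat) : Prop :=
  ∀ (cm : PySem.Dict String Bool) (r : String) (P : String → Prop),
    unvisited graph.keys cm + 1 ≤ fuel → r ∈ graph.keys →
    (∀ p, P p → ReachP (fun x => graph.getD x []) p r) →
    GoodP (· ∈ graph.keys) (fun x => graph.getD x []) P cm →
    (GoodP (· ∈ graph.keys) (fun x => graph.getD x []) P (dfsA graph fuel cm r).2 ∧
     (∀ k, cm.contains k = true → (dfsA graph fuel cm r).2.contains k = true) ∧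
     ((dfsA graph fuel cm r).1 = true → LfpP (· ∈ graph.keys) (fun x => graph.getD x []) r) ∧
     ((dfsA graph fuel cm r).1 = false → P r ∨ ¬ LfpP (· ∈ graph.keys) (fun x => graph.getD x []) r))

def SpecList (graph : PySem.Dict String (List String)) (fuel : Nat) : Prop :=
  ∀ (cm : PySem.Dict String Bool) (l : List String) (P : String → Prop),
    unvisited graph.keys cm + 1 ≤ fuel → (∀ i ∈ l, i ∈ graph.keys) →
    (∀ i ∈ l, ∀ p, P p → ReachP (fun x => graph.getD x []) p i) →
    GoodP (· ∈ graph.keys) (fun x => graph.getD x []) P cm →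
    (GoodP (· ∈ graph.keys) (fun x => graph.getD x []) P (dfsAList graph fuel cm l).2 ∧
     (∀ k, cm.contains k = true → (dfsAList graph fuel cm l).2.contains k = true) ∧
     ((dfsAList graph fuel cm l).1.all id = true →
        ∀ i ∈ l, LfpP (· ∈ graph.keys) (fun x => graph.getD x []) i) ∧
     ((dfsAList graph fuel cm l).1.all id = false →
        ∃ i ∈ l, P i ∨ ¬ LfpP (· ∈ graph.keys) (fun x => graph.getD x []) i))

theorem specList_of_specOne {graph : PySem.Dict String (List String)} {fuel : Nat}
    (hone : SpecOne graph fuel) : SpecList graph fuel := by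
  intro cm l P
  induction l generalizing cm with
  | nil =>
    intro hf hK hR hG
    simp only [dfsAList]
    exact ⟨hG, fun k hk => hk, by simp, by simp⟩
  | cons i rest ih =>
    intro hf hK hR hG
    obtain ⟨hG1, hmono1, htrue1, hfalse1⟩ :=
      hone cm i P hf (hK i (by simp)) (fun p hp => hR i (by simp) p hp) hG
    have hf2 : unvisited graph.keys (dfsA graph fuel cm i).2 + 1 ≤ fuel :=
      le_trans (by have := unvisited_mono (K := graph.keys) hmono1; omega) hf
    obtain ⟨hG2, hmono2, htrue2, hfalse2⟩ :=
      ih (dfsA graph fuel cm i).2 hf2 (fun j hj => hK j (by simp [hj]))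
        (fun j hj p hp => hR j (by simp [hj]) p hp) hG1
    simp only [dfsAList]
    refine ⟨hG2, fun k hk => hmono2 k (hmono1 k hk), ?_, ?_⟩
    · intro hall j hj
      simp only [List.all_cons, Bool.and_eq_true, id] at hall
      rcases List.mem_cons.mp hj with rfl | hj
      · exact htrue1 hall.1
      · exact htrue2 hall.2 j hj
    · intro hall
      simp only [List.all_cons, Bool.and_eq_false_iff, id] at hall
      rcases hall with h1 | h2
      · exact ⟨i, by simp, hfalse1 h1⟩
      · obtain ⟨j, hj, hjj⟩ := hfalse2 h2
        exact ⟨j, by simp [hj], hjj⟩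

theorem specOne_succ {graph : PySem.Dict String (List String)} {fuel : Nat}
    (hnd : graph.keys.Nodup)
    (hcl : ∀ x ∈ graph.keys, ∀ i ∈ graph.getD x [], i ∈ graph.keys)
    (hlist : SpecList graph fuel) : SpecOne graph (fuel + 1) := by
  intro cm r P hf hr hR hG
  by_cases hc : cm.contains r = true
  · -- cached
    obtain ⟨b, hb⟩ : ∃ b, cm.get? r = some b := by
      rw [PySem.Dict.contains_eq_isSome_get?] at hc
      exact Option.isSome_iff_exists.mp hc
    have hgd : cm.getD r false = b := PySem.Dict.getD_of_get?_eq_some _ _ hb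
    simp only [dfsA, hc, if_true, hgd]
    exact ⟨hG, fun k hk => hk, (hG r b hb).1, (hG r b hb).2⟩
  · have hc' : cm.contains r = false := by simpa using hc
    have hG1 : GoodP (· ∈ graph.keys) (fun x => graph.getD x []) (fun p => P p ∨ p = r)
        (cm.insert r false) := by
      intro x b hx
      rw [PySem.Dict.get?_insert] at hx
      by_cases hxr : x = r
      · rw [if_pos hxr] at hx
        injection hx with hxe
        subst hxe
        exact ⟨fun h => absurd h (by simp), fun _ => Or.inl (Or.inr hxr)⟩
      · rw [if_neg hxr] at hx
        exact ⟨(hG x b hx).1, fun hbf => ((hG x b hx).2 hbf).imp Or.inl id⟩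
    have hf1 : unvisited graph.keys (cm.insert r false) + 1 ≤ fuel := by
      have := unvisited_insert (v := false) hnd hr hc'
      omega
    have hR1 : ∀ i ∈ graph.getD r [], ∀ p, (P p ∨ p = r) →
        ReachP (fun x => graph.getD x []) p i := by
      intro i hi p hp
      rcases hp with hp | rfl
      · exact Relation.ReflTransGen.tail (hR p hp) hi
      · exact Relation.ReflTransGen.single hi
    obtain ⟨hG2, hmono2, htrue2, hfalse2⟩ :=
      hlist (cm.insert r false) (graph.getD r []) (fun p => P p ∨ p = r)
        hf1 (hcl r hr) hR1 hG1
    have hVtrue : (dfsAList graph fuel (cm.insert r false) (graph.getD r [])).1.all id = true →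
        LfpP (· ∈ graph.keys) (fun x => graph.getD x []) r :=
      fun hall => lfp_intro hr (htrue2 hall)
    have hVfalse : (dfsAList graph fuel (cm.insert r false) (graph.getD r [])).1.all id = false →
        P r ∨ ¬ LfpP (· ∈ graph.keys) (fun x => graph.getD x []) r := by
      intro hall
      obtain ⟨i, hi, hii⟩ := hfalse2 hall
      rcases hii with (hp | rfl) | hnl
      · exact Or.inr (fun ⟨n, hn⟩ => not_mkp_of_cycle hi (hR i hp) n hn)
      · exact Or.inr (fun ⟨n, hn⟩ => not_mkp_of_cycle hi Relation.ReflTransGen.refl n hn)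
      · exact Or.inr (fun hl => hnl (lfp_elim hl i hi))
    simp only [dfsA, hc', Bool.false_eq_true, if_false]
    refine ⟨?_, ?_, fun h => hVtrue h, fun h => hVfalse h⟩
    · intro x b hx
      rw [PySem.Dict.get?_insert] at hx
      by_cases hxr : x = r
      · rw [if_pos hxr] at hx
        injection hx with hxe
        subst hxe
        subst hxr
        exact ⟨fun h => hVtrue h, fun h => hVfalse h⟩
      · rw [if_neg hxr] at hx
        refine ⟨(hG2 x b hx).1, fun hbf => ?_⟩
        rcases (hG2 x b hx).2 hbf with (hp | hxr') | hnl
        · exact Or.inl hp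
        · exact absurd hxr' hxr
        · exact Or.inr hnl
    · intro k hk
      rw [PySem.Dict.contains_insert]
      have : (cm.insert r false).contains k = true := by
        rw [PySem.Dict.contains_insert, hk, Bool.or_true]
      rw [hmono2 k this, Bool.or_true]

theorem specOne_all {graph : PySem.Dict String (List String)}
    (hnd : graph.keys.Nodup)
    (hcl : ∀ x ∈ graph.keys, ∀ i ∈ graph.getD x [], i ∈ graph.keys) :
    ∀ fuel, SpecOne graph fuel := by
  intro fuel
  induction fuel with
  | zero => intro cm r P hf; omega
  | succ fuel ih => exact specOne_succ hnd hcl (specList_of_specOne ih)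

theorem A_fold {graph : PySem.Dict String (List String)}
    (hnd : graph.keys.Nodup)
    (hcl : ∀ x ∈ graph.keys, ∀ i ∈ graph.getD x [], i ∈ graph.keys)
    (f : String → Bool)
    (hf : ∀ r, f r = true ↔ LfpP (· ∈ graph.keys) (fun x => graph.getD x []) r)
    (fuel : Nat) :
    ∀ (rs : List String) (acc : List String) (cm : PySem.Dict String Bool),
      (∀ r ∈ rs, r ∈ graph.keys) → unvisited graph.keys cm + 1 ≤ fuel →
      GoodP (· ∈ graph.keys) (fun x => graph.getD x []) (fun _ => False) cm →
      (rs.foldl (fun acc r =>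
          let q := dfsA graph fuel acc.2 r
          (if q.1 then acc.1 ++ [r] else acc.1, q.2)) (acc, cm)).1 = acc ++ rs.filter f := by
  intro rs
  induction rs with
  | nil => intro acc cm _ _ _; simp
  | cons r rs ih =>
    intro acc cm hrs hfuel hG
    obtain ⟨hG', hmono, ht, hfo⟩ :=
      specOne_all hnd hcl fuel cm r (fun _ => False) hfuel (hrs r (by simp))
        (fun p hp => hp.elim) hG
    have hb : (dfsA graph fuel cm r).1 = f r := by
      cases hq : (dfsA graph fuel cm r).1 with
      | true => exact ((hf r).mpr (ht hq)).symm
      | false =>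
        cases hfr : f r with
        | false => rfl
        | true =>
          rcases hfo hq with h | h
          · exact h.elim
          · exact absurd ((hf r).mp hfr) h
    have hf' : unvisited graph.keys (dfsA graph fuel cm r).2 + 1 ≤ fuel :=
      le_trans (by have := unvisited_mono (K := graph.keys) hmono; omega) hfuel
    simp only [List.foldl_cons, hb]
    rw [ih _ _ (fun x hx => hrs x (by simp [hx])) hf' hG']
    cases hfr : f r <;> simp [hfr]

-- ---- build of A's graph / B's need dict ----

def NeedOf (pairs : List (String × List String)) (r : String) : List String :=
  (pairs.filter (fun p => p.1 == r)).flatMap (fun p => p.2)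

def Contrib (recipes supplies : List String) (r : String) (ings : List String) : List String :=
  (ings.filter (fun i => !(PySem.Set.ofList supplies).contains i)).map
    (fun i => if (PySem.Set.ofList recipes).contains i then i else r)

def AdjOf (recipes supplies : List String) (pairs : List (String × List String)) (r : String) : List String :=
  Contrib recipes supplies r (NeedOf pairs r)

theorem needDict_getD : ∀ (pairs : List (String × List String)) (d : PySem.Dict String (List String)) (r : String),
    (pairs.foldl (fun d p => d.modify p.1 [] (fun l => l ++ p.2)) d).getD r [] = d.getD r [] ++ NeedOf pairs r := by
  intro pairs
  induction pairs with
  | nil => intro d r; simp [NeedOf]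
  | cons p t ih =>
    intro d r
    simp only [List.foldl_cons]
    rw [ih, PySem.Dict.getD_modify]
    by_cases h : r = p.1
    · subst h
      simp [NeedOf]
    · have hb : (p.1 == r) = false := by simpa using fun hh => h hh.symm
      simp [NeedOf, hb, if_neg h]

theorem scontains_iff {s : List String} {x : String} : PySem.Set.contains s x = true ↔ x ∈ s := by
  simp [PySem.Set.contains]

theorem build_inner (recipes supplies : List String) :
    ∀ (ings : List String) (g : PySem.Dict String (List String)) (r : String),
      g.keys = PySem.Set.ofList recipes → r ∈ recipes →
      ((ings.foldl (fun g ingr =>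
          if (PySem.Set.ofList supplies).contains ingr then g
          else g.modify r [] (fun l => l ++ [if g.contains ingr then ingr else r])) g).keys
          = PySem.Set.ofList recipes ∧
       ∀ r', (ings.foldl (fun g ingr =>
          if (PySem.Set.ofList supplies).contains ingr then g
          else g.modify r [] (fun l => l ++ [if g.contains ingr then ingr else r])) g).getD r' []
          = g.getD r' [] ++ (if r' = r then Contrib recipes supplies r ings else [])) := by
  intro ings
  induction ings with
  | nil => intro g r hg _; exact ⟨hg, fun r' => by simp [Contrib]⟩
  | cons i t ih =>
    intro g r hg hr
    simp only [List.foldl_cons]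
    by_cases hs : (PySem.Set.ofList supplies).contains i = true
    · rw [if_pos hs]
      obtain ⟨h1, h2⟩ := ih g r hg hr
      refine ⟨h1, fun r' => ?_⟩
      rw [h2 r']
      have hsm : i ∈ supplies := (PySem.Set.mem_ofList supplies i).mp (scontains_iff.mp hs)
      have : Contrib recipes supplies r (i :: t) = Contrib recipes supplies r t := by
        simp [Contrib, hsm]
      rw [this]
    · have hs' : (PySem.Set.ofList supplies).contains i = false := by simpa using hs
      have hsm : i ∉ supplies := by
        intro hm
        rw [scontains_iff.mpr ((PySem.Set.mem_ofList supplies i).mpr hm)] at hs'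
        simp at hs'
      rw [if_neg (by simp [hsm])]
      have hcr : g.contains r = true := by
        rw [PySem.Dict.contains_eq_decide_mem_keys, hg, decide_eq_true_eq,
          PySem.Set.mem_ofList]
        exact hr
      have he : g.contains i = (PySem.Set.ofList recipes).contains i := by
        rw [PySem.Dict.contains_eq_decide_mem_keys, hg]
        apply Bool.eq_iff_iff.mpr
        rw [decide_eq_true_eq, scontains_iff]
      obtain ⟨h1, h2⟩ := ih (g.modify r [] (fun l => l ++ [if g.contains i then i else r])) r
        (by rw [PySem.Dict.keys_modify, PySem.Dict.keys_insert_of_contains _ _ hcr]; exact hg) hr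
      refine ⟨h1, fun r' => ?_⟩
      rw [h2 r', PySem.Dict.getD_modify]
      have hcontrib : Contrib recipes supplies r (i :: t)
          = (if (PySem.Set.ofList recipes).contains i then i else r) :: Contrib recipes supplies r t := by
        simp [Contrib, hsm]
      by_cases hrr : r' = r
      · subst hrr
        rw [if_pos rfl, if_pos rfl, hcontrib, he]
        simp
      · rw [if_neg hrr, if_neg hrr, if_neg hrr]

theorem build_outer (recipes supplies : List String) :
    ∀ (pairs : List (String × List String)) (g : PySem.Dict String (List String)),
      g.keys = PySem.Set.ofList recipes → (∀ p ∈ pairs, p.1 ∈ recipes) →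
      ((pairs.foldl (fun g p =>
          p.2.foldl (fun g ingr =>
            if (PySem.Set.ofList supplies).contains ingr then g
            else g.modify p.1 [] (fun l => l ++ [if g.contains ingr then ingr else p.1])) g) g).keys
          = PySem.Set.ofList recipes ∧
       ∀ r, (pairs.foldl (fun g p =>
          p.2.foldl (fun g ingr =>
            if (PySem.Set.ofList supplies).contains ingr then g
            else g.modify p.1 [] (fun l => l ++ [if g.contains ingr then ingr else p.1])) g) g).getD r []
          = g.getD r [] ++ (pairs.filter (fun p => p.1 == r)).flatMap (fun p => Contrib recipes supplies r p.2)) := by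
  intro pairs
  induction pairs with
  | nil => intro g hg _; exact ⟨hg, fun r => by simp⟩
  | cons p t ih =>
    intro g hg hp
    simp only [List.foldl_cons]
    obtain ⟨k1, d1⟩ := build_inner recipes supplies p.2 g p.1 hg (hp p (by simp))
    obtain ⟨k2, d2⟩ := ih _ k1 (fun q hq => hp q (by simp [hq]))
    refine ⟨k2, fun r => ?_⟩
    rw [d2 r, d1 r]
    by_cases h : p.1 = r
    · subst h
      simp [List.append_assoc]
    · have hb : (p.1 == r) = false := by simpa using h
      rw [if_neg (fun hh => h hh.symm)]
      simp [hb]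

theorem adjOf_eq_flatMap (recipes supplies : List String) (pairs : List (String × List String)) (r : String) :
    AdjOf recipes supplies pairs r
      = (pairs.filter (fun p => p.1 == r)).flatMap (fun p => Contrib recipes supplies r p.2) := by
  induction pairs with
  | nil => simp [AdjOf, NeedOf, Contrib]
  | cons p t ih =>
    by_cases h : (p.1 == r) = true
    · simp only [AdjOf, NeedOf, Contrib, List.filter_cons, h, if_true, List.flatMap_cons,
        List.filter_append, List.map_append] at *
      rw [ih]
    · have hb : (p.1 == r) = false := by simpa using h
      simp only [AdjOf, NeedOf, Contrib, List.filter_cons, hb, Bool.false_eq_true, if_false] at *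
      rw [ih]

theorem graph0_keys (recipes : List String) :
    (recipes.foldl (fun d r => d.insert r []) (PySem.Dict.empty : PySem.Dict String (List String))).keys
      = PySem.Set.ofList recipes := by
  rw [PySem.Dict.keys_foldl_insert recipes (fun _ _ => ([] : List String)) PySem.Dict.empty]
  rw [PySem.Dict.keys_empty]
  rfl

theorem graph0_getD_aux (recipes : List String) :
    ∀ (d : PySem.Dict String (List String)), (∀ x, d.getD x [] = []) →
      ∀ r, (recipes.foldl (fun d r => d.insert r []) d).getD r [] = [] := by
  induction recipes with
  | nil => exact fun d hd r => hd r
  | cons a t ih =>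
    intro d hd r
    simp only [List.foldl_cons]
    refine ih _ (fun x => ?_) r
    rw [PySem.Dict.getD_insert]
    split
    · rfl
    · exact hd x

theorem graph0_getD (recipes : List String) (r : String) :
    (recipes.foldl (fun d r => d.insert r []) (PySem.Dict.empty : PySem.Dict String (List String))).getD r [] = [] := by
  exact graph0_getD_aux recipes PySem.Dict.empty (fun x => by rw [PySem.Dict.getD_empty]) r

theorem foldl_range_getElem {γ : Type} :
    ∀ (xs : List String) (ys : List (List String)) (g : γ) (F : γ → String → List String → γ),
      xs.length ≤ ys.length →
      (List.range xs.length).foldl (fun g k => F g (xs[k]?.getD "") (ys[k]?.getD [])) g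
        = (xs.zip ys).foldl (fun g p => F g p.1 p.2) g := by
  intro xs
  induction xs with
  | nil => intro ys g F _; simp
  | cons x xs ih =>
    intro ys g F h
    cases ys with
    | nil => simp at h
    | cons y ys =>
      rw [List.length_cons, List.range_succ_eq_map]
      simp only [List.foldl_cons, List.getElem?_cons_zero, Option.getD_some, List.foldl_map,
        List.getElem?_cons_succ, List.zip_cons_cons]
      exact ih ys (F g x y) F (by simpa using h)

theorem foldl_range_eq_zip {γ : Type} :
    ∀ (xs : List String) (ys : List (List String)) (g : γ) (F : γ → String → List String → γ),
      xs.length ≤ ys.length →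
      (PySem.List.pyRange 0 (xs.length : Int) 1).foldl
        (fun g i => F g ((PySem.List.pyGet? xs i).getD "") ((PySem.List.pyGet? ys i).getD [])) g
        = (xs.zip ys).foldl (fun g p => F g p.1 p.2) g := by
  intro xs ys g F h
  rw [PySem.List.pyRange_zero_natCast, List.foldl_map]
  exact Eq.trans
    (PySem.List.foldl_congr_mem (List.range xs.length) _
      (fun g (k : Nat) => F g (xs[k]?.getD "") (ys[k]?.getD [])) g
      (fun acc k _ => by rw [PySem.List.pyGet?_natCast, PySem.List.pyGet?_natCast]))
    (foldl_range_getElem xs ys g F h)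

-- ---- B side ----

theorem foldl_range_const {α : Type} : ∀ (n : Nat) (f : α → α) (s : α),
    (List.range n).foldl (fun m _ => f m) s = f^[n] s := by
  intro n f s
  induction n with
  | zero => simp
  | succ n ih =>
    rw [List.range_succ, List.foldl_append, ih, List.foldl_cons, List.foldl_nil,
      Function.iterate_succ_apply']

theorem mem_adjOf (recipes supplies : List String) (pairs : List (String × List String)) (r i : String) :
    i ∈ AdjOf recipes supplies pairs r ↔
      ∃ i0 ∈ NeedOf pairs r, (PySem.Set.ofList supplies).contains i0 = false ∧
        i = if (PySem.Set.ofList recipes).contains i0 then i0 else r := by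
  constructor
  · intro h
    simp only [AdjOf, Contrib] at h
    obtain ⟨i0, h0, hmap⟩ := List.mem_map.mp h
    obtain ⟨h0n, h0f⟩ := List.mem_filter.mp h0
    exact ⟨i0, h0n, by simpa using h0f, hmap.symm⟩
  · rintro ⟨i0, h0, hs, rfl⟩
    simp only [AdjOf, Contrib]
    refine List.mem_map.mpr ⟨i0, List.mem_filter.mpr ⟨h0, ?_⟩, rfl⟩
    have hns : i0 ∉ supplies := fun hm => by
      rw [scontains_iff.mpr ((PySem.Set.mem_ofList _ _).mpr hm)] at hs; simp at hs
    simp [hns]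

theorem bad_not_mkp (recipes supplies : List String) (pairs : List (String × List String)) {r i0 : String}
    (h0 : i0 ∈ NeedOf pairs r)
    (hs : (PySem.Set.ofList supplies).contains i0 = false)
    (hk : (PySem.Set.ofList recipes).contains i0 = false) :
    ∀ n, ¬ MkP (· ∈ recipes) (AdjOf recipes supplies pairs) n r := by
  have hmem : r ∈ AdjOf recipes supplies pairs r :=
    (mem_adjOf recipes supplies pairs r r).mpr ⟨i0, h0, hs, by rw [hk]; simp⟩
  exact fun n => not_mkp_of_cycle hmem Relation.ReflTransGen.refl n


def needDict (pairs : List (String × List String)) : PySem.Dict String (List String) :=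
  pairs.foldl (fun d p => d.modify p.1 [] (fun l => l ++ p.2)) PySem.Dict.empty

def stepB (supplies : List String) (need : PySem.Dict String (List String))
    (made : PySem.Set String) : PySem.Set String :=
  PySem.Set.ofList ((need.items.filter
    (fun p => p.2.all (fun i => (PySem.Set.ofList supplies).contains i || made.contains i))).map (fun p => p.1))

theorem needDict_keys (pairs : List (String × List String)) :
    (needDict pairs).keys = PySem.Set.ofList (pairs.map Prod.fst) := by
  unfold needDict
  rw [PySem.Dict.keys_foldl_modify_key pairs Prod.fst [] (fun _ p => fun l => l ++ p.2)
    PySem.Dict.empty]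
  rw [PySem.Dict.keys_empty]
  rfl

theorem mem_stepB (supplies : List String) (pairs : List (String × List String))
    (made : PySem.Set String) (r : String) :
    r ∈ stepB supplies (needDict pairs) made ↔
      r ∈ pairs.map Prod.fst ∧ ∀ i ∈ NeedOf pairs r,
        (PySem.Set.ofList supplies).contains i = true ∨ PySem.Set.contains made i = true := by
  have hkeys := needDict_keys pairs
  have hnd : (needDict pairs).keys.Nodup := by rw [hkeys]; exact PySem.Set.nodup_ofList _
  have hgetD : ∀ x, (needDict pairs).getD x [] = NeedOf pairs x := by
    intro x
    unfold needDict
    rw [needDict_getD pairs PySem.Dict.empty x, PySem.Dict.getD_empty, List.nil_append]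
  constructor
  · intro h
    simp only [stepB] at h
    obtain ⟨p, hp, hp1⟩ := List.mem_map.mp ((PySem.Set.mem_ofList _ _).mp h)
    obtain ⟨hpi, hpc⟩ := List.mem_filter.mp hp
    subst hp1
    have hget : (needDict pairs).get? p.1 = some p.2 :=
      (PySem.Dict.get?_eq_some_iff_mem_items _ _ _ hnd).mpr (by simpa using hpi)
    have hv : p.2 = NeedOf pairs p.1 := by
      rw [← hgetD p.1]
      exact (PySem.Dict.getD_of_get?_eq_some _ _ hget).symm
    constructor
    · have hm : p.1 ∈ (needDict pairs).keys :=
        PySem.Dict.mem_keys_of_mem_items (d := needDict pairs) hpi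
      rw [hkeys] at hm
      exact (PySem.Set.mem_ofList _ _).mp hm
    · intro i hi
      have := (List.all_eq_true.mp hpc) i (by rw [hv]; exact hi)
      exact Bool.or_eq_true_iff.mp this
  · rintro ⟨hk, hall⟩
    simp only [stepB]
    apply (PySem.Set.mem_ofList _ _).mpr
    apply List.mem_map.mpr
    refine ⟨(r, NeedOf pairs r), List.mem_filter.mpr ⟨?_, ?_⟩, rfl⟩
    · have hrk : r ∈ (needDict pairs).keys := by
        rw [hkeys]; exact (PySem.Set.mem_ofList _ _).mpr hk
      have hne : (needDict pairs).get? r ≠ none :=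
        fun hn => (PySem.Dict.get?_eq_none_iff_not_mem_keys _ _).mp hn hrk
      obtain ⟨v, hv⟩ := Option.ne_none_iff_exists'.mp hne
      have hveq : v = NeedOf pairs r := by
        rw [← hgetD r]
        exact (PySem.Dict.getD_of_get?_eq_some _ _ hv).symm
      subst hveq
      exact (PySem.Dict.get?_eq_some_iff_mem_items _ _ _ hnd).mp hv
    · exact List.all_eq_true.mpr (fun i hi => Bool.or_eq_true_iff.mpr (hall i hi))

theorem iterate_iff_mk (recipes supplies : List String) (pairs : List (String × List String))
    (hfst : pairs.map Prod.fst = recipes) :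
    ∀ (k : Nat) (r : String), r ∈ (stepB supplies (needDict pairs))^[k] [] ↔
      MkP (· ∈ recipes) (AdjOf recipes supplies pairs) k r := by
  intro k
  induction k with
  | zero => intro r; simp [MkP]
  | succ k ih =>
    intro r
    rw [Function.iterate_succ_apply',
      mem_stepB supplies pairs ((stepB supplies (needDict pairs))^[k] []) r, hfst]
    constructor
    · rintro ⟨hk, hall⟩
      refine ⟨hk, ?_⟩
      intro i hi
      obtain ⟨i0, h0, hs0, hieq⟩ := (mem_adjOf recipes supplies pairs r i).mp hi
      rcases hall i0 h0 with hsup | hmade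
      · rw [hsup] at hs0; simp at hs0
      · have hmk : MkP (· ∈ recipes) (AdjOf recipes supplies pairs) k i0 :=
          (ih i0).mp (scontains_iff.mp hmade)
        have hik : i0 ∈ recipes := mkp_inK hmk
        rw [hieq, if_pos (scontains_iff.mpr ((PySem.Set.mem_ofList _ _).mpr hik))]
        exact hmk
    · intro hmk
      refine ⟨hmk.1, ?_⟩
      intro i0 h0
      by_cases hs0 : (PySem.Set.ofList supplies).contains i0 = true
      · exact Or.inl hs0
      · have hs0' : (PySem.Set.ofList supplies).contains i0 = false := by simpa using hs0
        by_cases hk0 : (PySem.Set.ofList recipes).contains i0 = true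
        · refine Or.inr ?_
          have hmem : i0 ∈ AdjOf recipes supplies pairs r :=
            (mem_adjOf recipes supplies pairs r i0).mpr ⟨i0, h0, hs0', by rw [if_pos hk0]⟩
          exact scontains_iff.mpr ((ih i0).mpr (hmk.2 i0 hmem))
        · have hk0' : (PySem.Set.ofList recipes).contains i0 = false := by simpa using hk0
          exact absurd hmk (bad_not_mkp recipes supplies pairs h0 hs0' hk0' (k + 1))

theorem iterate_nodup (supplies : List String) (pairs : List (String × List String)) :
    ∀ k, ((stepB supplies (needDict pairs))^[k] []).Nodup := by
  intro k
  cases k with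
  | zero => exact List.nodup_nil
  | succ k =>
    rw [Function.iterate_succ_apply']
    simp only [stepB]
    exact PySem.Set.nodup_ofList _

theorem lfp_iff_iterate (recipes supplies : List String) (pairs : List (String × List String))
    (hfst : pairs.map Prod.fst = recipes) (r : String) :
    LfpP (· ∈ recipes) (AdjOf recipes supplies pairs) r ↔
      r ∈ (stepB supplies (needDict pairs))^[(PySem.Set.ofList recipes).length] [] := by
  have hiff : ∀ (k : Nat) (x : String), x ∈ (stepB supplies (needDict pairs))^[k] [] ↔
      MkP (· ∈ recipes) (AdjOf recipes supplies pairs) k x :=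
    iterate_iff_mk recipes supplies pairs hfst
  have hndL := iterate_nodup supplies pairs
  have hsubK : ∀ k, ((stepB supplies (needDict pairs))^[k] []) ⊆ PySem.Set.ofList recipes := by
    intro k x hx
    exact (PySem.Set.mem_ofList _ _).mpr (mkp_inK ((hiff k x).mp hx))
  have hmonoL : ∀ (k : Nat) (x : String), x ∈ (stepB supplies (needDict pairs))^[k] [] →
      x ∈ (stepB supplies (needDict pairs))^[k + 1] [] :=
    fun k x hx => (hiff _ _).mpr (mkp_mono ((hiff _ _).mp hx))
  have hlen : ∀ k, ((stepB supplies (needDict pairs))^[k] []).length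
      ≤ (PySem.Set.ofList recipes).length :=
    fun k => (List.Nodup.subperm (hndL k) (hsubK k)).length_le
  have aux : ∀ k, (∃ j, j ≤ k ∧ ∀ x, MkP (· ∈ recipes) (AdjOf recipes supplies pairs) (j + 1) x ↔
      MkP (· ∈ recipes) (AdjOf recipes supplies pairs) j x) ∨
      k ≤ ((stepB supplies (needDict pairs))^[k] []).length := by
    intro k
    induction k with
    | zero => exact Or.inr (Nat.zero_le _)
    | succ k ihk =>
      rcases ihk with ⟨j, hj, hjj⟩ | hlenk
      · exact Or.inl ⟨j, Nat.le_succ_of_le hj, hjj⟩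
      · by_cases hst : ∀ x, MkP (· ∈ recipes) (AdjOf recipes supplies pairs) (k + 1) x ↔
            MkP (· ∈ recipes) (AdjOf recipes supplies pairs) k x
        · exact Or.inl ⟨k, Nat.le_succ _, hst⟩
        · refine Or.inr ?_
          obtain ⟨x, hx⟩ := not_forall.mp hst
          have hx1 : MkP (· ∈ recipes) (AdjOf recipes supplies pairs) (k + 1) x := by
            by_contra h1
            exact hx ⟨fun a => (h1 a).elim, fun a => mkp_mono a⟩
          have hx0 : ¬ MkP (· ∈ recipes) (AdjOf recipes supplies pairs) k x :=
            fun h0 => hx ⟨fun _ => h0, fun _ => mkp_mono h0⟩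
          have hcons : (x :: (stepB supplies (needDict pairs))^[k] []).Nodup :=
            List.nodup_cons.mpr ⟨fun hh => hx0 ((hiff _ _).mp hh), hndL k⟩
          have hsub2 : (x :: (stepB supplies (needDict pairs))^[k] [])
              ⊆ (stepB supplies (needDict pairs))^[k + 1] [] := by
            intro z hz
            rcases List.mem_cons.mp hz with rfl | hz
            · exact (hiff _ _).mpr hx1
            · exact hmonoL k z hz
          have hle := (List.Nodup.subperm hcons hsub2).length_le
          simp only [List.length_cons] at hle
          omega
  have hstab : ∃ j, j ≤ (PySem.Set.ofList recipes).length ∧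
      ∀ x, MkP (· ∈ recipes) (AdjOf recipes supplies pairs) (j + 1) x ↔
        MkP (· ∈ recipes) (AdjOf recipes supplies pairs) j x := by
    rcases aux (PySem.Set.ofList recipes).length with h | hlenN
    · exact h
    · refine ⟨(PySem.Set.ofList recipes).length, le_refl _, fun x => ⟨?_, mkp_mono⟩⟩
      intro h1
      by_contra h0
      have hcons : (x :: (stepB supplies (needDict pairs))^[(PySem.Set.ofList recipes).length] []).Nodup :=
        List.nodup_cons.mpr ⟨fun hh => h0 ((hiff _ _).mp hh), hndL _⟩
      have hsub2 : (x :: (stepB supplies (needDict pairs))^[(PySem.Set.ofList recipes).length] [])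
          ⊆ (stepB supplies (needDict pairs))^[(PySem.Set.ofList recipes).length + 1] [] := by
        intro z hz
        rcases List.mem_cons.mp hz with rfl | hz
        · exact (hiff _ _).mpr h1
        · exact hmonoL _ z hz
      have h2 := (List.Nodup.subperm hcons hsub2).length_le
      have h3 := hlen ((PySem.Set.ofList recipes).length + 1)
      simp only [List.length_cons] at h2
      omega
  constructor
  · rintro ⟨n, hn⟩
    obtain ⟨j, hjN, hj⟩ := hstab
    by_cases hnN : n ≤ (PySem.Set.ofList recipes).length
    · exact (hiff _ r).mpr (mkp_le hnN hn)
    · exact (hiff _ r).mpr (mkp_le hjN ((stab_of_eq hj n (by omega) r).mp hn))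
  · intro h
    exact ⟨(PySem.Set.ofList recipes).length, (hiff _ r).mp h⟩

theorem setAdd_foldl_length : ∀ (xs : List String) (s : PySem.Set String),
    (xs.foldl PySem.Set.add s).length ≤ s.length + xs.length := by
  intro xs
  induction xs with
  | nil => intro s; simp
  | cons x t ih =>
    intro s
    simp only [List.foldl_cons]
    have h1 := ih (PySem.Set.add s x)
    have h2 : (PySem.Set.add s x).length ≤ s.length + 1 := by
      simp only [PySem.Set.add]
      split
      · omega
      · simp
    simp only [List.length_cons]
    omega

theorem ofList_length_le (xs : List String) : (PySem.Set.ofList xs).length ≤ xs.length := by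
  rw [PySem.Set.ofList_eq_foldl]
  simpa using setAdd_foldl_length xs []

-- ===== VERDICT (by name: the statement is the Claim_ definition above) =====
theorem dfs_recursion_spec : Claim_equal_dfs_recursion := by
  intro recipes ingredients supplies _ hPre
  unfold Pre_dfs_recursion at hPre
  unfold Spec_dfs_recursion
  -- B side: the iterated step function
  have hsize : (needDict (recipes.zip ingredients)).size = (PySem.Set.ofList recipes).length := by
    have h1 : (needDict (recipes.zip ingredients)).size
        = (needDict (recipes.zip ingredients)).keys.length := by
      simp [PySem.Dict.size, PySem.Dict.keys]
    rw [h1, needDict_keys, List.map_fst_zip hPre]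
  have hB : dfs_recursion_alt recipes ingredients supplies
      = recipes.filter (fun r => PySem.Set.contains
          ((stepB supplies (needDict (recipes.zip ingredients)))^[(PySem.Set.ofList recipes).length] []) r) := by
    simp only [dfs_recursion_alt]
    rw [foldl_range_const]
    rw [show PySem.Dict.size ((recipes.zip ingredients).foldl
        (fun d p => d.modify p.1 [] (fun l => l ++ p.2)) PySem.Dict.empty)
        = (PySem.Set.ofList recipes).length from hsize]
    rfl
  -- A side: rewrite the range-fold graph build into a zip fold
  have hgraph := foldl_range_eq_zip recipes ingredients
    (recipes.foldl (fun d r => d.insert r []) (PySem.Dict.empty : PySem.Dict String (List String)))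
    (fun g r ings => ings.foldl (fun g ingr =>
        if (PySem.Set.ofList supplies).contains ingr then g
        else g.modify r [] (fun l => l ++ [if g.contains ingr then ingr else r])) g)
    hPre
  beta_reduce at hgraph
  obtain ⟨hK, hD⟩ := build_outer recipes supplies (recipes.zip ingredients)
    (recipes.foldl (fun d r => d.insert r []) (PySem.Dict.empty : PySem.Dict String (List String)))
    (graph0_keys recipes)
    (fun p hp => by
      obtain ⟨a, b⟩ := p
      exact (List.of_mem_zip hp).1)
  have hDfull : ∀ r, ((recipes.zip ingredients).foldl (fun g p =>
      p.2.foldl (fun g ingr =>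
        if (PySem.Set.ofList supplies).contains ingr then g
        else g.modify p.1 [] (fun l => l ++ [if g.contains ingr then ingr else p.1])) g)
      (recipes.foldl (fun d r => d.insert r []) (PySem.Dict.empty : PySem.Dict String (List String)))).getD r []
      = AdjOf recipes supplies (recipes.zip ingredients) r := by
    intro r
    rw [hD r, graph0_getD, adjOf_eq_flatMap, List.nil_append]
  have hnd : ((recipes.zip ingredients).foldl (fun g p =>
      p.2.foldl (fun g ingr =>
        if (PySem.Set.ofList supplies).contains ingr then g
        else g.modify p.1 [] (fun l => l ++ [if g.contains ingr then ingr else p.1])) g)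
      (recipes.foldl (fun d r => d.insert r []) (PySem.Dict.empty : PySem.Dict String (List String)))).keys.Nodup := by
    rw [hK]; exact PySem.Set.nodup_ofList _
  have hcl : ∀ x ∈ ((recipes.zip ingredients).foldl (fun g p =>
      p.2.foldl (fun g ingr =>
        if (PySem.Set.ofList supplies).contains ingr then g
        else g.modify p.1 [] (fun l => l ++ [if g.contains ingr then ingr else p.1])) g)
      (recipes.foldl (fun d r => d.insert r []) (PySem.Dict.empty : PySem.Dict String (List String)))).keys,
      ∀ i ∈ ((recipes.zip ingredients).foldl (fun g p =>
      p.2.foldl (fun g ingr =>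
        if (PySem.Set.ofList supplies).contains ingr then g
        else g.modify p.1 [] (fun l => l ++ [if g.contains ingr then ingr else p.1])) g)
      (recipes.foldl (fun d r => d.insert r []) (PySem.Dict.empty : PySem.Dict String (List String)))).getD x [],
      i ∈ ((recipes.zip ingredients).foldl (fun g p =>
      p.2.foldl (fun g ingr =>
        if (PySem.Set.ofList supplies).contains ingr then g
        else g.modify p.1 [] (fun l => l ++ [if g.contains ingr then ingr else p.1])) g)
      (recipes.foldl (fun d r => d.insert r []) (PySem.Dict.empty : PySem.Dict String (List String)))).keys := by
    intro x hx i hi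
    rw [hDfull x] at hi
    obtain ⟨i0, h0, hs0, hieq⟩ := (mem_adjOf recipes supplies (recipes.zip ingredients) x i).mp hi
    by_cases hk0 : (PySem.Set.ofList recipes).contains i0 = true
    · rw [hieq, if_pos hk0, hK]
      exact scontains_iff.mp hk0
    · rw [hieq, if_neg hk0]
      exact hx
  have hKiff : ∀ x, (x ∈ recipes) ↔ x ∈ ((recipes.zip ingredients).foldl (fun g p =>
      p.2.foldl (fun g ingr =>
        if (PySem.Set.ofList supplies).contains ingr then g
        else g.modify p.1 [] (fun l => l ++ [if g.contains ingr then ingr else p.1])) g)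
      (recipes.foldl (fun d r => d.insert r []) (PySem.Dict.empty : PySem.Dict String (List String)))).keys := by
    intro x
    rw [hK]
    exact (PySem.Set.mem_ofList recipes x).symm
  have hf : ∀ r, (PySem.Set.contains
      ((stepB supplies (needDict (recipes.zip ingredients)))^[(PySem.Set.ofList recipes).length] []) r) = true
      ↔ LfpP (· ∈ ((recipes.zip ingredients).foldl (fun g p =>
          p.2.foldl (fun g ingr =>
            if (PySem.Set.ofList supplies).contains ingr then g
            else g.modify p.1 [] (fun l => l ++ [if g.contains ingr then ingr else p.1])) g)
          (recipes.foldl (fun d r => d.insert r []) (PySem.Dict.empty : PySem.Dict String (List String)))).keys)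
          (fun x => ((recipes.zip ingredients).foldl (fun g p =>
          p.2.foldl (fun g ingr =>
            if (PySem.Set.ofList supplies).contains ingr then g
            else g.modify p.1 [] (fun l => l ++ [if g.contains ingr then ingr else p.1])) g)
          (recipes.foldl (fun d r => d.insert r []) (PySem.Dict.empty : PySem.Dict String (List String)))).getD x []) r := by
    intro r
    rw [scontains_iff]
    rw [← lfp_iff_iterate recipes supplies (recipes.zip ingredients) (List.map_fst_zip hPre) r]
    exact exists_congr (fun n => mkp_congr hKiff (fun x => (hDfull x).symm))
  have hfuel : unvisited ((recipes.zip ingredients).foldl (fun g p =>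
      p.2.foldl (fun g ingr =>
        if (PySem.Set.ofList supplies).contains ingr then g
        else g.modify p.1 [] (fun l => l ++ [if g.contains ingr then ingr else p.1])) g)
      (recipes.foldl (fun d r => d.insert r []) (PySem.Dict.empty : PySem.Dict String (List String)))).keys
      PySem.Dict.empty + 1 ≤ recipes.length + 1 := by
    have h1 : unvisited ((recipes.zip ingredients).foldl (fun g p =>
        p.2.foldl (fun g ingr =>
          if (PySem.Set.ofList supplies).contains ingr then g
          else g.modify p.1 [] (fun l => l ++ [if g.contains ingr then ingr else p.1])) g)
        (recipes.foldl (fun d r => d.insert r []) (PySem.Dict.empty : PySem.Dict String (List String)))).keys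
        PySem.Dict.empty = (PySem.Set.ofList recipes).length := by
      rw [hK]
      simp only [unvisited, PySem.Dict.contains_empty, Bool.not_false, List.filter_true]
    rw [h1]
    have := ofList_length_le recipes
    omega
  have hGood : GoodP (· ∈ ((recipes.zip ingredients).foldl (fun g p =>
      p.2.foldl (fun g ingr =>
        if (PySem.Set.ofList supplies).contains ingr then g
        else g.modify p.1 [] (fun l => l ++ [if g.contains ingr then ingr else p.1])) g)
      (recipes.foldl (fun d r => d.insert r []) (PySem.Dict.empty : PySem.Dict String (List String)))).keys)
      (fun x => ((recipes.zip ingredients).foldl (fun g p =>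
      p.2.foldl (fun g ingr =>
        if (PySem.Set.ofList supplies).contains ingr then g
        else g.modify p.1 [] (fun l => l ++ [if g.contains ingr then ingr else p.1])) g)
      (recipes.foldl (fun d r => d.insert r []) (PySem.Dict.empty : PySem.Dict String (List String)))).getD x [])
      (fun _ => False) PySem.Dict.empty := by
    intro r b h
    rw [PySem.Dict.get?_empty] at h
    cases h
  have hA := A_fold hnd hcl
    (fun r => PySem.Set.contains
      ((stepB supplies (needDict (recipes.zip ingredients)))^[(PySem.Set.ofList recipes).length] []) r)
    hf (recipes.length + 1) recipes [] PySem.Dict.empty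
    (fun r hr => (hKiff r).mp hr) hfuel hGood
  simp only [dfs_recursion]
  rw [hgraph, hA, List.nil_append, hB]
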